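-- pv_equiv track=rewrite | github.com/green-thunder/42_algorithms | problems/arrays/leftRightDifference.py | leftRightDifference42
-- ===== SOURCE A (Python) =====
-- def sign(diff):
--     if diff > 0:
--         return 1
--     elif diff < 0:
--         return -1
--
--     return 0
--
-- def leftRightDifference42(nums: list) -> list:
--     left, right = 0, sum(nums)
--     result = []
--
--     for num in nums:
--         right -= num
--         result.append(sign(right - left))
--         left += num
--
--     return result
-- ===== SOURCE B (Python) =====
-- def leftRightDifference42(nums: list) -> list:
--     prefix = []
--     run = 0
--     for num in nums:
--         run += num
--         prefix.append(run)
--     total = prefix[-1] if prefix else 0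
--     result = []
--     for i in range(len(nums)):
--         left = prefix[i - 1] if i > 0 else 0
--         d = (total - prefix[i]) - left
--         result.append((d > 0) - (d < 0))
--     return result
-- ===== Notes on version B (the rewrite author's own statement) =====
-- stated objective: alternative
-- what changed: B materializes a prefix-sum table in a first pass and then indexes it (left = prefix[i-1], right = total - prefix[i], sign written arithmetically as (d>0)-(d<0)), instead of A's single pass threading two running sums and a sign helper.
import Mathlib
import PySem

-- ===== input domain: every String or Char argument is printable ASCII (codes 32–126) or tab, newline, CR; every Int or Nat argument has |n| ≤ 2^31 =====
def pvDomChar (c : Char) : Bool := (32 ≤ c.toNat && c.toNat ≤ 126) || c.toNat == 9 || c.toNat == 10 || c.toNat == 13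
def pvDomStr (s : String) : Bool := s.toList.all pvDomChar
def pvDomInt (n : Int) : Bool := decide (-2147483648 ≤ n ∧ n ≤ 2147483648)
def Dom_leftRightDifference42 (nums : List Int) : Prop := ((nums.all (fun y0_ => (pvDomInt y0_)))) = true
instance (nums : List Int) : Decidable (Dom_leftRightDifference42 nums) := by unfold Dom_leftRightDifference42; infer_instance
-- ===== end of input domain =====

-- One honest line: B builds a prefix-sum table and indexes it, instead of A's two running sums; same O(n) cost, alternative decomposition.

-- ===== PORT A =====
def pySign (diff : Int) : Int :=
  if diff > 0 then 1 else if diff < 0 then -1 else 0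

def leftRightDifference42 (nums : List Int) : List Int :=
  (nums.foldl (fun (st : Int × Int × List Int) num =>
      let right := st.2.1 - num
      let result := st.2.2 ++ [pySign (right - st.1)]
      (st.1 + num, right, result))
    (0, nums.sum, [])).2.2

-- ===== PORT B =====
-- prefix[-1] (taken only when prefix ≠ []) and prefix[i], prefix[i-1] for 0 ≤ i < len
-- are always in range, so pyGet? never yields none here; .getD 0 is exact.
def leftRightDifference42_alt (nums : List Int) : List Int :=
  let pr := (nums.foldl (fun (st : List Int × Int) num =>
      (st.1 ++ [st.2 + num], st.2 + num)) ([], 0)).1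
  let total := if pr ≠ [] then (PySem.List.pyGet? pr (-1)).getD 0 else 0
  (PySem.List.pyRange 0 nums.length 1).map (fun i =>
    let left := if i > 0 then (PySem.List.pyGet? pr (i - 1)).getD 0 else 0
    let d := (total - (PySem.List.pyGet? pr i).getD 0) - left
    (if d > 0 then (1 : Int) else 0) - (if d < 0 then 1 else 0))

-- ===== PRECONDITION & SPEC =====
def Spec_leftRightDifference42 (nums : List Int) (out : List Int) : Prop := out = leftRightDifference42_alt nums
instance (nums : List Int) (out : List Int) : Decidable (Spec_leftRightDifference42 nums out) := by unfold Spec_leftRightDifference42; infer_instance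

-- ===== CLAIM (what is proved, stated in full; the proofs are below) =====
def Claim_equal_leftRightDifference42 : Prop := ∀ (nums : List Int), Dom_leftRightDifference42 nums → Spec_leftRightDifference42 nums (leftRightDifference42 nums)

-- ===== LEMMAS AND PROOFS =====

-- prefix sum of the first k elements
def pvS (nums : List Int) (k : Nat) : Int := (nums.take k).sum

theorem pvS_zero (nums : List Int) : pvS nums 0 = 0 := rfl

theorem pvS_cons_succ (n : Int) (t : List Int) (k : Nat) :
    pvS (n :: t) (k + 1) = n + pvS t k := by
  simp [pvS]

theorem pvA_fold (nums : List Int) : ∀ (l r : Int) (acc : List Int),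
    (nums.foldl (fun (st : Int × Int × List Int) num =>
      let right := st.2.1 - num
      let result := st.2.2 ++ [pySign (right - st.1)]
      (st.1 + num, right, result)) (l, r, acc)).2.2
    = acc ++ (List.range nums.length).map
        (fun i => pySign ((r - pvS nums (i + 1)) - (l + pvS nums i))) := by
  induction nums with
  | nil => intro l r acc; simp
  | cons n t ih =>
    intro l r acc
    simp only [List.foldl_cons]
    rw [ih]
    simp only [List.length_cons, List.range_succ_eq_map, List.map_cons, List.map_map]
    simp [pvS_cons_succ, pvS_zero, List.append_assoc, Function.comp]
    intro a _
    congr 1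
    ring

theorem pvB_fold (nums : List Int) : ∀ (run : Int) (acc : List Int),
    (nums.foldl (fun (st : List Int × Int) num =>
      (st.1 ++ [st.2 + num], st.2 + num)) (acc, run)).1
    = acc ++ (List.range nums.length).map (fun i => run + pvS nums (i + 1)) := by
  induction nums with
  | nil => intro run acc; simp
  | cons n t ih =>
    intro run acc
    simp only [List.foldl_cons]
    rw [ih]
    simp only [List.length_cons, List.range_succ_eq_map, List.map_cons, List.map_map]
    simp [pvS_cons_succ, pvS_zero, List.append_assoc, Function.comp]
    intro a _
    ring

theorem pvSign_arith (d : Int) :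
    (if d > 0 then (1 : Int) else 0) - (if d < 0 then 1 else 0) = pySign d := by
  unfold pySign; split_ifs <;> omega

theorem leftRightDifference42_spec : Claim_equal_leftRightDifference42 := by
  unfold Claim_equal_leftRightDifference42 Spec_leftRightDifference42
  intro nums _
  unfold leftRightDifference42 leftRightDifference42_alt
  rw [pvA_fold, pvB_fold]
  simp only [List.nil_append, zero_add]
  rw [PySem.List.pyRange_one]
  simp only [sub_zero, Int.toNat_natCast, List.map_map]
  apply List.map_congr_left
  intro k hk
  rw [List.mem_range] at hk
  have hne : (List.range nums.length).map (fun i => pvS nums (i + 1)) ≠ [] := by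
    simp only [ne_eq, List.map_eq_nil_iff, List.range_eq_nil]
    omega
  have hlen : ((List.range nums.length).map (fun i => pvS nums (i + 1))).length
      = nums.length := by simp
  have hlast : PySem.List.pyGet? ((List.range nums.length).map (fun i => pvS nums (i + 1))) (-1)
      = some nums.sum := by
    rw [PySem.List.pyGet?_neg_one, List.getLast?_eq_getElem?]
    rw [hlen]
    rw [List.getElem?_map, List.getElem?_range (by omega)]
    simp only [Option.map_some]
    congr 1
    have : nums.length - 1 + 1 = nums.length := by omega
    rw [this]
    simp [pvS]
  have hgetk : PySem.List.pyGet? ((List.range nums.length).map (fun i => pvS nums (i + 1)))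
      ((0 : Int) + (k : Int)) = some (pvS nums (k + 1)) := by
    rw [zero_add, PySem.List.pyGet?_natCast, List.getElem?_map,
      List.getElem?_range hk]
    rfl
  simp only [Function.comp, hne, if_true, ne_eq, not_false_iff, hlast, hgetk,
    Option.getD_some]
  rw [← pvSign_arith]
  rcases Nat.eq_zero_or_pos k with h0 | hpos
  · subst h0
    norm_num [pySign, pvS]
  · have hcast : ((0 : Int) + (k : Int)) > 0 := by omega
    rw [if_pos hcast]
    have : (0 : Int) + (k : Int) - 1 = ((k - 1 : Nat) : Int) := by omega
    rw [this, PySem.List.pyGet?_natCast, List.getElem?_map,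
      List.getElem?_range (by omega)]
    have hk1 : k - 1 + 1 = k := by omega
    simp only [Option.map_some, Option.getD_some, hk1]

-- ===== VERDICT (by name: the statement is the Claim_ definition above) =====
-- (leftRightDifference42_spec proved above as the only theorem)
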